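-- pv_equiv track=rewrite | github.com/Mxs3/mase-editor | src/MaseEditor.py | findPico
-- ===== SOURCE A (Python) =====
-- def findPico(port_list):
--     com_port = None
--     connections = len(port_list)
--
--     for _ in range(0, connections):
--         port = port_list[_]
--         strPort = str(port)
--
--         if "Board" in strPort:
--             split_port = strPort.split(" ")
--             com_port = (split_port[0])
--
--     return com_port
-- ===== SOURCE B (Python) =====
-- def findPico(port_list):
--     for port in reversed(port_list):
--         strPort = str(port)
--         if "Board" in strPort:
--             return strPort.split(" ")[0]
--     return None
-- ===== Notes on version B (the rewrite author's own statement) =====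
-- stated objective: alternative
-- what changed: Replaces A's forward full scan that keeps overwriting the last match with a reverse scan that early-returns on the first match (the last forward match).
import Mathlib
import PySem

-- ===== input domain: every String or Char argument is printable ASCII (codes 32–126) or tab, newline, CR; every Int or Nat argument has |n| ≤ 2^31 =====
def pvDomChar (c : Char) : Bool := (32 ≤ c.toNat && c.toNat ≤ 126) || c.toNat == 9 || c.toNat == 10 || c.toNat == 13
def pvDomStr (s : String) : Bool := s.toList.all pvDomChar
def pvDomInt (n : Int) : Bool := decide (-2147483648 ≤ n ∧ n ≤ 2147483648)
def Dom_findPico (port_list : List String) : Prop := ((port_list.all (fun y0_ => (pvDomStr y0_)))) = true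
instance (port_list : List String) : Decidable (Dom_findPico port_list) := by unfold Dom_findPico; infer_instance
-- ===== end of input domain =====

-- B replaces A's forward overwrite-the-last-match scan with a reverse scan that returns the first match.

-- ===== PORT A =====
-- Forward loop keeping the latest match in com_port; split_port[0] always exists
-- (split? with sep " " is always some, and str.split(" ") is never empty), so getD/headD are exact.
def findPico (port_list : List String) : Option String :=
  port_list.foldl
    (fun com_port port =>
      if PySem.Str.isIn "Board" port then
        some ((((PySem.Str.split? port " ").getD []).headD ""))
      else com_port)
    none

-- ===== PORT B =====
-- Reverse scan, early return on the first match.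
def findPicoRev (ports : List String) : Option String :=
  match ports with
  | [] => none
  | port :: rest =>
    if PySem.Str.isIn "Board" port then
      some ((((PySem.Str.split? port " ").getD []).headD ""))
    else findPicoRev rest

def findPico_alt (port_list : List String) : Option String :=
  findPicoRev port_list.reverse

-- ===== PRECONDITION & SPEC =====
def Spec_findPico (port_list : List String) (out : Option String) : Prop := out = findPico_alt port_list
instance (port_list : List String) (out : Option String) : Decidable (Spec_findPico port_list out) := by unfold Spec_findPico; infer_instance

-- ===== CLAIM (what is proved, stated in full; the proofs are below) =====
def Claim_equal_findPico : Prop := ∀ (port_list : List String), Dom_findPico port_list → Spec_findPico port_list (findPico port_list)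

-- ===== LEMMAS AND PROOFS =====
theorem findPicoRev_append (xs ys : List String) :
    findPicoRev (xs ++ ys) =
      match findPicoRev xs with
      | some x => some x
      | none => findPicoRev ys := by
  induction xs with
  | nil => simp [findPicoRev]
  | cons p rest ih =>
    simp only [List.cons_append, findPicoRev]
    split_ifs with h
    · rfl
    · exact ih

theorem findPico_foldl_eq (l : List String) (acc : Option String) :
    l.foldl
      (fun com_port port =>
        if PySem.Str.isIn "Board" port then
          some ((((PySem.Str.split? port " ").getD []).headD ""))
        else com_port)
      acc =
      match findPicoRev l.reverse with
      | some x => some x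
      | none => acc := by
  induction l generalizing acc with
  | nil => simp [findPicoRev]
  | cons p rest ih =>
    simp only [List.foldl_cons, List.reverse_cons, findPicoRev_append, ih]
    cases findPicoRev rest.reverse with
    | some x => rfl
    | none =>
      simp only [findPicoRev]
      split_ifs <;> rfl

-- ===== VERDICT (by name: the statement is the Claim_ definition above) =====
theorem findPico_spec : Claim_equal_findPico := by
  intro port_list _
  show findPico port_list = findPico_alt port_list
  unfold findPico findPico_alt
  rw [findPico_foldl_eq]
  cases findPicoRev port_list.reverse <;> rfl
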